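-- pv_equiv track=rewrite | github.com/luixlu-wq/guide | src/stage-6/topic08c_slo_regression_gate_advanced.py | detect_repeated_tool_signatures
-- ===== SOURCE A (Python) =====
-- def detect_repeated_tool_signatures(signatures: list[str], repeat_threshold: int = 3) -> bool:
--     """Detect repeated bad-loop pattern from tool-call signatures."""
--     if len(signatures) < repeat_threshold:
--         return False
--     last = signatures[-1]
--     streak = 1
--     for i in range(len(signatures) - 2, -1, -1):
--         if signatures[i] == last:
--             streak += 1
--         else:
--             break
--     return streak >= repeat_threshold
-- ===== SOURCE B (Python) =====
-- def detect_repeated_tool_signatures(signatures: list[str], repeat_threshold: int = 3) -> bool: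
--     """Detect repeated bad-loop pattern via one forward pass tracking the current run."""
--     if len(signatures) < repeat_threshold:
--         return False
--     prev = None
--     run = 0
--     for s in signatures:
--         run = run + 1 if s == prev else 1
--         prev = s
--     return run >= repeat_threshold
-- ===== Notes on version B (the rewrite author's own statement) =====
-- stated objective: idiomatic
-- what changed: Replaces A's backward index loop with early break by a single forward pass that maintains the current run length, so the final run length falls out of the loop state.
import Mathlib
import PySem

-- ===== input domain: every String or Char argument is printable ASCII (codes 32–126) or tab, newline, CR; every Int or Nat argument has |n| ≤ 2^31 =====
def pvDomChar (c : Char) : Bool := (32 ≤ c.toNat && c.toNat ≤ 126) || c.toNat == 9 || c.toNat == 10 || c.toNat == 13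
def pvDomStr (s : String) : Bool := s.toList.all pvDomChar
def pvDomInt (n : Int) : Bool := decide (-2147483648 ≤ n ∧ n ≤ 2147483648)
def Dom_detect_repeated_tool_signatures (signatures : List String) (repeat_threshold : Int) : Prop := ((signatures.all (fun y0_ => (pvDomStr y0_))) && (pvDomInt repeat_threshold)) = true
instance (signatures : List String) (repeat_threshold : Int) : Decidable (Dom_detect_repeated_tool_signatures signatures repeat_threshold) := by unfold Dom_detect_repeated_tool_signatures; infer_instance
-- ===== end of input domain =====

-- B replaces A's backward loop-with-break by one forward pass maintaining the current run length (idiomatic; same cost).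

-- ===== PORT A =====
-- the backward 'for i in range(len-2, -1, -1)' with break: processes indices k-1, k-2, …, 0; break = return streak
def pvLoopA (signatures : List String) (last : String) : Nat → Int → Int
  | 0, streak => streak
  | k + 1, streak =>
      if PySem.List.pyGet? signatures (k : Int) = some last then
        pvLoopA signatures last k (streak + 1)
      else streak

def detect_repeated_tool_signatures (signatures : List String) (repeat_threshold : Int) : Bool :=
  if (signatures.length : Int) < repeat_threshold then false
  else
    match PySem.List.pyGet? signatures (-1) with
    | none => false  -- Python raises IndexError here; excluded by Pre_
    | some last =>
        let streak := pvLoopA signatures last (signatures.length - 1) 1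
        decide (repeat_threshold ≤ streak)

-- ===== PORT B =====
def detect_repeated_tool_signatures_alt (signatures : List String) (repeat_threshold : Int) : Bool :=
  if (signatures.length : Int) < repeat_threshold then false
  else
    let st := signatures.foldl
      (fun (acc : Option String × Int) s =>
        (some s, if some s = acc.1 then acc.2 + 1 else 1))
      (none, 0)
    decide (repeat_threshold ≤ st.2)

-- ===== PRECONDITION & SPEC =====
-- Pre_ excludes exactly the inputs where A raises IndexError: empty list with repeat_threshold ≤ 0.
def Pre_detect_repeated_tool_signatures (signatures : List String) (repeat_threshold : Int) : Prop :=
  signatures ≠ [] ∨ 0 < repeat_threshold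
instance (signatures : List String) (repeat_threshold : Int) : Decidable (Pre_detect_repeated_tool_signatures signatures repeat_threshold) := by unfold Pre_detect_repeated_tool_signatures; infer_instance
def pvWitness_detect_repeated_tool_signatures : List String × Int := (["f", "f", "f"], 3)

def Spec_detect_repeated_tool_signatures (signatures : List String) (repeat_threshold : Int) (out : Bool) : Prop := out = detect_repeated_tool_signatures_alt signatures repeat_threshold
instance (signatures : List String) (repeat_threshold : Int) (out : Bool) : Decidable (Spec_detect_repeated_tool_signatures signatures repeat_threshold out) := by unfold Spec_detect_repeated_tool_signatures; infer_instance

-- ===== CLAIM =====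
def Claim_equal_detect_repeated_tool_signatures : Prop := ∀ (signatures : List String) (repeat_threshold : Int), Dom_detect_repeated_tool_signatures signatures repeat_threshold → Pre_detect_repeated_tool_signatures signatures repeat_threshold → Spec_detect_repeated_tool_signatures signatures repeat_threshold (detect_repeated_tool_signatures signatures repeat_threshold)

-- ===== LEMMAS AND PROOFS =====

-- backward count: trailing elements (given reversed) equal to v, stopping at the first mismatch
def pvBCount (v : String) : List String → Int
  | [] => 0
  | y :: t => if y = v then 1 + pvBCount v t else 0

theorem pvLoopA_eq (L : List String) (last : String) (k : Nat) (hk : k ≤ L.length) (s : Int) :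
    pvLoopA L last k s = s + pvBCount last (L.take k).reverse := by
  induction k generalizing s with
  | zero => simp [pvLoopA, pvBCount]
  | succ k ih =>
      have hklt : k < L.length := by omega
      have hget : PySem.List.pyGet? L ((k : Int)) = L[k]? := PySem.List.pyGet?_natCast ..
      have htake : (L.take (k + 1)).reverse = L[k] :: (L.take k).reverse := by
        rw [List.take_add_one, List.getElem?_eq_getElem hklt]
        simp
      rw [show pvLoopA L last (k + 1) s
            = if PySem.List.pyGet? L ((k : Int)) = some last then pvLoopA L last k (s + 1) else s
          from rfl]
      rw [hget, List.getElem?_eq_getElem hklt, htake]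
      by_cases h : L[k] = last
      · rw [if_pos (by rw [h]), ih (by omega), pvBCount, if_pos h]; ring
      · rw [if_neg (by simpa using h), pvBCount, if_neg h]; ring

theorem pvFold_eq (x : String) (ys : List String) :
    (ys ++ [x]).foldl
      (fun (acc : Option String × Int) s =>
        (some s, if some s = acc.1 then acc.2 + 1 else 1))
      (none, 0) = (some x, 1 + pvBCount x ys.reverse) := by
  induction ys using List.reverseRecOn generalizing x with
  | nil => simp [pvBCount]
  | append_singleton zs y ih =>
      rw [List.append_assoc, List.foldl_append (l' := [y] ++ [x])]
      rw [show [y] ++ [x] = [y, x] from rfl]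
      have hy := ih y
      rw [List.foldl_append] at hy
      simp only [List.foldl_cons, List.foldl_nil] at hy ⊢
      have hy2 := congrArg Prod.snd hy
      simp only at hy2
      rw [hy2]
      simp only [List.reverse_append, List.reverse_singleton, List.singleton_append, pvBCount]
      by_cases h : x = y
      · subst h; simp; ring
      · simp [h, Ne.symm h]

theorem pvMain (ys : List String) (x : String) (t : Int) :
    detect_repeated_tool_signatures (ys ++ [x]) t
      = detect_repeated_tool_signatures_alt (ys ++ [x]) t := by
  unfold detect_repeated_tool_signatures detect_repeated_tool_signatures_alt
  by_cases hlen : ((ys ++ [x]).length : Int) < t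
  · rw [if_pos hlen, if_pos hlen]
  · rw [if_neg hlen, if_neg hlen]
    have hlast : PySem.List.pyGet? (ys ++ [x]) (-1) = some x := by
      rw [PySem.List.pyGet?_neg_one]
      simp
    rw [hlast]
    have hk : (ys ++ [x]).length - 1 = ys.length := by simp
    have htake : ((ys ++ [x]).take ys.length) = ys := by simp
    simp only [hk]
    rw [pvLoopA_eq _ _ _ (by simp) 1, htake, pvFold_eq]

-- ===== VERDICT =====
theorem detect_repeated_tool_signatures_spec : Claim_equal_detect_repeated_tool_signatures := by
  intro signatures repeat_threshold _ hpre
  unfold Spec_detect_repeated_tool_signatures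
  cases hsig : signatures.reverse with
  | nil =>
      have : signatures = [] := by simpa using congrArg List.reverse hsig
      subst this
      rcases hpre with h | h
      · exact absurd rfl h
      · unfold detect_repeated_tool_signatures detect_repeated_tool_signatures_alt
        rw [if_pos (by simpa using h), if_pos (by simpa using h)]
  | cons x rest =>
      have : signatures = rest.reverse ++ [x] := by
        have := congrArg List.reverse hsig
        simpa using this
      rw [this]
      exact pvMain rest.reverse x repeat_threshold
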